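-- pv_equiv track=rewrite | github.com/20mini/20mini.github.io | Python/Programmers/Lv1/숫자 짝꿍.py | solution
-- ===== SOURCE A (Python) =====
-- def solution(X, Y):
--     answer=''
--     x_list,y_list=[X.count(str(i)) for i in range(10)],[Y.count(str(i)) for i in range(10)] # X와 Y가 가진 0~9 숫자의 개수들
--     for i in range(9,-1,-1): # 큰 숫자부터 answer에 추가해주도록 한다.
--         for _ in range(min(x_list[i],y_list[i])): #x_list[i]와 y_list[i] 중 더 작은 값이 숫자 i의 공통된 개수
--             answer+=str(i)
--     if answer=="":
--         answer='-1' # 반환된 문자열이 비어있으면 '-1' 리턴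
--     elif answer[0]=='0': # 첫 문자가 '0'이다 == 모든 문자가 '0'으로 이루어져 있다.
--         answer='0'
--     return answer
-- ===== SOURCE B (Python) =====
-- def solution(X, Y):
--     xs = sorted((c for c in X if '0' <= c <= '9'), reverse=True)
--     ys = sorted((c for c in Y if '0' <= c <= '9'), reverse=True)
--     out = []
--     i = j = 0
--     while i < len(xs) and j < len(ys):
--         if xs[i] == ys[j]:
--             out.append(xs[i])
--             i += 1
--             j += 1
--         elif xs[i] > ys[j]:
--             i += 1
--         else:
--             j += 1
--     if not out:
--         return '-1'
--     if out[0] == '0':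
--         return '0'
--     return ''.join(out)
-- ===== Notes on version B (the rewrite author's own statement) =====
-- stated objective: alternative
-- what changed: A counts each digit 0-9 into two fixed bucket arrays and emits buckets 9..0; B never counts: it sorts the digit characters of X and of Y descending and intersects the two sorted sequences with a two-pointer merge, emitting each common digit directly in output order, with the same ''->'-1' and leading-'0' fixups.
import Mathlib
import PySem

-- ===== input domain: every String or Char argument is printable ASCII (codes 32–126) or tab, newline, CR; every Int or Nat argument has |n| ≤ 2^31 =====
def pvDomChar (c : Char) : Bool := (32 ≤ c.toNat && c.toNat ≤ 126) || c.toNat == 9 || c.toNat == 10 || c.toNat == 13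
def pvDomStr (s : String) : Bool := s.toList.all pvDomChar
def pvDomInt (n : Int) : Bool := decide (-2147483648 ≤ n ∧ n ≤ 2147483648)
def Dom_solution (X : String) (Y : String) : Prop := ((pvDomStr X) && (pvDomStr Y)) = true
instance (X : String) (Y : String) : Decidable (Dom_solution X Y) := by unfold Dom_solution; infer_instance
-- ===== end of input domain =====

-- B replaces A's ten fixed count buckets by sorting each string's digits descending and intersecting them with a two-pointer merge; objective: alternative, same cost.

-- ===== PORT A =====
def solution (X : String) (Y : String) : String :=
  let x_list : List Int := (PySem.List.pyRange 0 10 1).map (fun i => (PySem.Str.count X (PySem.Int.toStr i) : Int))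
  let y_list : List Int := (PySem.List.pyRange 0 10 1).map (fun i => (PySem.Str.count Y (PySem.Int.toStr i) : Int))
  let answer : String :=
    (PySem.List.pyRange 9 (-1) (-1)).foldl (fun answer i =>
      (PySem.List.pyRange 0 (min (PySem.List.pyGetD x_list i 0) (PySem.List.pyGetD y_list i 0)) 1).foldl
        (fun answer _ => answer ++ PySem.Int.toStr i) answer) ""
  if answer = "" then "-1"
  else if PySem.Str.pyGet? answer 0 = some '0' then "0"
  else answer

-- ===== PORT B =====
-- the two-pointer while loop of Source B, transcribed as structural recursion on the two lists
def mergeCommon : List Char → List Char → List Char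
  | [], _ => []
  | _ :: _, [] => []
  | a :: xs, b :: ys =>
      if a = b then a :: mergeCommon xs ys
      else if b < a then mergeCommon xs (b :: ys)
      else mergeCommon (a :: xs) ys

def solution_alt (X : String) (Y : String) : String :=
  let xs : List Char := PySem.List.sorted (X.toList.filter (fun c => decide ('0' ≤ c ∧ c ≤ '9'))) (fun c => c) true
  let ys : List Char := PySem.List.sorted (Y.toList.filter (fun c => decide ('0' ≤ c ∧ c ≤ '9'))) (fun c => c) true
  let out : List Char := mergeCommon xs ys
  if out = [] then "-1"
  else if PySem.List.pyGet? out 0 = some '0' then "0"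
  else String.ofList out

-- ===== PRECONDITION & SPEC =====
def Spec_solution (X : String) (Y : String) (out : String) : Prop := out = solution_alt X Y
instance (X : String) (Y : String) (out : String) : Decidable (Spec_solution X Y out) := by unfold Spec_solution; infer_instance

-- ===== CLAIM (what is proved, stated in full; the proofs are below) =====
def Claim_equal_solution : Prop := ∀ (X : String) (Y : String), Dom_solution X Y → Spec_solution X Y (solution X Y)

-- ===== LEMMAS AND PROOFS =====

-- per-digit common count
def pvCnt (X Y : String) (c : Char) : Nat := min (X.toList.count c) (Y.toList.count c)

-- the canonical answer list: common digits in descending order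
def pvCanon (X Y : String) : List Char :=
  ['9','8','7','6','5','4','3','2','1','0'].flatMap (fun c => List.replicate (pvCnt X Y c) c)

-- the shared fixup both ports apply to the answer list
def pvF (l : List Char) : String :=
  if l = [] then "-1"
  else if PySem.List.pyGet? l 0 = some '0' then "0"
  else String.ofList l

theorem pv_count_go (c : Char) : ∀ (fuel : Nat) (s : List Char) (acc : Nat), s.length ≤ fuel →
    PySem.Chars.count.go [c] fuel s acc = acc + s.count c := by
  intro fuel
  induction fuel with
  | zero => intro s acc h
            rw [Nat.le_zero, List.length_eq_zero_iff] at h; subst h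
            simp [PySem.Chars.count.go]
  | succ n ih =>
    intro s acc h
    cases s with
    | nil => simp [PySem.Chars.count.go]
    | cons hd t =>
      simp only [PySem.Chars.count.go, List.isPrefixOf, List.length_cons] at *
      by_cases hc : c = hd
      · subst hc
        simp only [beq_self_eq_true, Bool.true_and, if_pos, List.length_nil,
          Nat.zero_add, List.drop_succ_cons, List.drop_zero]
        rw [ih t (acc+1) (by omega)]
        simp
        omega
      · have hb : (c == hd) = false := by simpa using hc
        simp only [hb, Bool.false_and, Bool.false_eq_true, if_neg, not_false_iff]
        rw [ih t acc (by omega)]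
        have hb2 : (hd == c) = false := by simpa using Ne.symm hc
        simp [List.count_cons, hb2]

-- single-character needle: Python str.count is the character count
theorem pv_count_single (s : List Char) (c : Char) :
    PySem.Chars.count s [c] = s.count c := by
  simp only [PySem.Chars.count, List.isEmpty_cons, Bool.false_eq_true, if_neg, not_false_iff]
  simpa using pv_count_go c s.length s 0 le_rfl

theorem pv_fold_append (c : Char) : ∀ (l : List Int) (s : String),
    (l.foldl (fun a (_ : Int) => a ++ String.ofList [c]) s).toList
      = s.toList ++ List.replicate l.length c := by
  intro l
  induction l with
  | nil => simp
  | cons hd t ih =>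
    intro s
    rw [List.foldl_cons, ih]
    simp [List.replicate_succ]

theorem pv_len_pyRange (n : Nat) : (PySem.List.pyRange 0 (n : Int) 1).length = n := by
  rw [PySem.List.pyRange_of_pos _ _ (by norm_num)]
  simp only [List.length_map, List.length_range]
  split_ifs with h
  · omega
  · omega

-- A's inner loop: append one character k times
theorem pv_fold_one (c : Char) (k : Nat) (s : String) :
    (PySem.List.pyRange 0 (k : Int) 1).foldl (fun a (_ : Int) => a ++ String.ofList [c]) s
      = s ++ String.ofList (List.replicate k c) := by
  have h1 := pv_fold_append c (PySem.List.pyRange 0 (k : Int) 1) s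
  rw [pv_len_pyRange] at h1
  calc (PySem.List.pyRange 0 (k : Int) 1).foldl (fun a (_ : Int) => a ++ String.ofList [c]) s
      = String.ofList ((PySem.List.pyRange 0 (k : Int) 1).foldl
          (fun a (_ : Int) => a ++ String.ofList [c]) s).toList := String.ofList_toList.symm
    _ = String.ofList (s.toList ++ List.replicate k c) := by rw [h1]
    _ = s ++ String.ofList (List.replicate k c) := by simp

theorem pv_digit_mem (c : Char) (h : '0' ≤ c ∧ c ≤ '9') :
    c ∈ ['9','8','7','6','5','4','3','2','1','0'] := by
  obtain ⟨h1, h2⟩ := h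
  rw [Char.le_def] at h1 h2
  have hl : 48 ≤ c.toNat := h1
  have hr : c.toNat ≤ 57 := h2
  have hc : c = Char.ofNat c.toNat := (Char.ofNat_toNat c).symm
  interval_cases h3 : c.toNat <;> (rw [hc]; decide)

theorem pv_canon_count (X Y : String) (c : Char) :
    (pvCanon X Y).count c = if '0' ≤ c ∧ c ≤ '9' then pvCnt X Y c else 0 := by
  by_cases h : '0' ≤ c ∧ c ≤ '9'
  · rw [if_pos h]
    have hm := pv_digit_mem c h
    fin_cases hm <;>
      simp [pvCanon, List.count_append, List.count_replicate]
  · rw [if_neg h]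
    rw [List.count_eq_zero]
    intro hc
    apply h
    simp only [pvCanon, List.mem_flatMap] at hc
    obtain ⟨d, hd, hcd⟩ := hc
    have he := List.eq_of_mem_replicate hcd
    subst he
    fin_cases hd <;> exact ⟨by decide, by decide⟩

theorem pv_blocks_pairwise (f : Char → Nat) : ∀ (ds : List Char), List.Pairwise (fun a b => b < a) ds →
    (ds.flatMap (fun d => List.replicate (f d) d)).Pairwise (fun a b : Char => b ≤ a) := by
  intro ds
  induction ds with
  | nil => simp
  | cons d t ih =>
    intro hp
    rw [List.flatMap_cons, List.pairwise_append]
    refine ⟨List.pairwise_replicate.mpr (Or.inr le_rfl), ih hp.tail, ?_⟩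
    intro a ha b hb
    obtain rfl := List.eq_of_mem_replicate ha
    rw [List.mem_flatMap] at hb
    obtain ⟨e, he, hbe⟩ := hb
    obtain rfl := List.eq_of_mem_replicate hbe
    exact le_of_lt (List.rel_of_pairwise_cons hp he)

theorem pv_canon_pairwise (X Y : String) :
    (pvCanon X Y).Pairwise (fun a b : Char => b ≤ a) :=
  pv_blocks_pairwise (pvCnt X Y) _ (by decide)

-- members of the merge come from the left list
theorem pv_merge_mem : ∀ (xs ys : List Char) (c : Char), c ∈ mergeCommon xs ys → c ∈ xs := by
  intro xs ys
  induction xs, ys using mergeCommon.induct with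
  | case1 ys => simp [mergeCommon]
  | case2 a xs => simp [mergeCommon]
  | case3 xs a ys ih =>
      intro c hc
      rw [mergeCommon, if_pos rfl] at hc
      rcases List.mem_cons.mp hc with h1 | h1
      · simp [h1]
      · exact List.mem_cons_of_mem _ (ih c h1)
  | case4 a xs b ys hne hlt ih =>
      intro c hc
      rw [mergeCommon, if_neg hne, if_pos hlt] at hc
      exact List.mem_cons_of_mem _ (ih c hc)
  | case5 a xs b ys hne hge ih =>
      intro c hc
      rw [mergeCommon, if_neg hne, if_neg hge] at hc
      exact ih c hc

-- the merge of two descending lists is descending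
theorem pv_merge_pairwise : ∀ (xs ys : List Char),
    xs.Pairwise (fun a b => b ≤ a) → ys.Pairwise (fun a b => b ≤ a) →
    (mergeCommon xs ys).Pairwise (fun a b : Char => b ≤ a) := by
  intro xs ys
  induction xs, ys using mergeCommon.induct with
  | case1 ys => simp [mergeCommon]
  | case2 a xs => simp [mergeCommon]
  | case3 xs a ys ih =>
      intro hx hy
      rw [mergeCommon, if_pos rfl]
      refine List.pairwise_cons.mpr ⟨?_, ih hx.tail hy.tail⟩
      intro c hc
      exact List.rel_of_pairwise_cons hx (pv_merge_mem xs ys c hc)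
  | case4 a xs b ys hne hlt ih =>
      intro hx hy
      rw [mergeCommon, if_neg hne, if_pos hlt]
      exact ih hx.tail hy
  | case5 a xs b ys hne hge ih =>
      intro hx hy
      rw [mergeCommon, if_neg hne, if_neg hge]
      exact ih hx hy.tail

-- the merge of two descending lists realises the per-character minimum count
theorem pv_merge_count : ∀ (xs ys : List Char),
    xs.Pairwise (fun a b => b ≤ a) → ys.Pairwise (fun a b => b ≤ a) → ∀ (c : Char),
    (mergeCommon xs ys).count c = min (xs.count c) (ys.count c) := by
  intro xs ys
  induction xs, ys using mergeCommon.induct with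
  | case1 ys => simp [mergeCommon]
  | case2 a xs => simp [mergeCommon]
  | case3 xs a ys ih =>
      intro hx hy c
      rw [mergeCommon, if_pos rfl]
      simp only [List.count_cons, ih hx.tail hy.tail c]
      split_ifs <;> omega
  | case4 a xs b ys hne hlt ih =>
      intro hx hy c
      rw [mergeCommon, if_neg hne, if_pos hlt, ih hx.tail hy c]
      by_cases hc : c = a
      · subst hc
        have h0 : (b :: ys).count c = 0 := by
          rw [List.count_eq_zero]
          intro hm
          rcases List.mem_cons.mp hm with h1 | h1
          · exact hne h1
          · exact absurd (List.rel_of_pairwise_cons hy h1) (not_le.mpr hlt)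
        rw [h0]
        simp
      · simp [List.count_cons, (Ne.symm hc : a ≠ c)]
  | case5 a xs b ys hne hge ih =>
      intro hx hy c
      rw [mergeCommon, if_neg hne, if_neg hge, ih hx hy.tail c]
      by_cases hc : c = b
      · subst hc
        have hab : a < c := lt_of_le_of_ne (not_lt.mp hge) hne
        have h0 : (a :: xs).count c = 0 := by
          rw [List.count_eq_zero]
          intro hm
          rcases List.mem_cons.mp hm with h1 | h1
          · exact absurd (h1 ▸ hab) (lt_irrefl c)
          · exact absurd (List.rel_of_pairwise_cons hx h1) (not_le.mpr hab)
        rw [h0]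
        simp
      · simp [List.count_cons, (Ne.symm hc : b ≠ c)]

-- counts of the sorted digit filter
theorem pv_filter_count (X : String) (c : Char) :
    (PySem.List.sorted (X.toList.filter (fun c => decide ('0' ≤ c ∧ c ≤ '9'))) (fun c => c) true).count c
      = if '0' ≤ c ∧ c ≤ '9' then X.toList.count c else 0 := by
  rw [(PySem.List.sorted_perm _ _ _).count_eq]
  by_cases h : '0' ≤ c ∧ c ≤ '9'
  · rw [if_pos h]
    exact List.count_filter (by simpa using h)
  · rw [if_neg h, List.count_eq_zero]
    intro hm
    rw [List.mem_filter] at hm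
    exact h (by simpa using hm.2)

theorem pv_A_eq (X Y : String) : solution X Y = pvF (pvCanon X Y) := by
  simp only [solution]
  rw [show PySem.List.pyRange 9 (-1) (-1) = [9,8,7,6,5,4,3,2,1,0] from by decide,
      show PySem.List.pyRange 0 10 1 = [0,1,2,3,4,5,6,7,8,9] from by decide]
  simp only [List.map_cons, List.map_nil, List.foldl_cons, List.foldl_nil]
  norm_num [PySem.List.pyGetD, PySem.List.pyGet?, show PySem.List.pyIdx? 10 0 = some 0 from by decide, show PySem.List.pyIdx? 10 1 = some 1 from by decide, show PySem.List.pyIdx? 10 2 = some 2 from by decide, show PySem.List.pyIdx? 10 3 = some 3 from by decide, show PySem.List.pyIdx? 10 4 = some 4 from by decide, show PySem.List.pyIdx? 10 5 = some 5 from by decide, show PySem.List.pyIdx? 10 6 = some 6 from by decide, show PySem.List.pyIdx? 10 7 = some 7 from by decide, show PySem.List.pyIdx? 10 8 = some 8 from by decide, show PySem.List.pyIdx? 10 9 = some 9 from by decide, Option.bind]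
  simp only [show PySem.Int.toChars 0 = ['0'] from by decide, show PySem.Int.toChars 1 = ['1'] from by decide, show PySem.Int.toChars 2 = ['2'] from by decide, show PySem.Int.toChars 3 = ['3'] from by decide, show PySem.Int.toChars 4 = ['4'] from by decide, show PySem.Int.toChars 5 = ['5'] from by decide, show PySem.Int.toChars 6 = ['6'] from by decide, show PySem.Int.toChars 7 = ['7'] from by decide, show PySem.Int.toChars 8 = ['8'] from by decide, show PySem.Int.toChars 9 = ['9'] from by decide]
  simp only [show PySem.Int.toStr 0 = String.ofList ['0'] from by decide, show PySem.Int.toStr 1 = String.ofList ['1'] from by decide, show PySem.Int.toStr 2 = String.ofList ['2'] from by decide, show PySem.Int.toStr 3 = String.ofList ['3'] from by decide, show PySem.Int.toStr 4 = String.ofList ['4'] from by decide, show PySem.Int.toStr 5 = String.ofList ['5'] from by decide, show PySem.Int.toStr 6 = String.ofList ['6'] from by decide, show PySem.Int.toStr 7 = String.ofList ['7'] from by decide, show PySem.Int.toStr 8 = String.ofList ['8'] from by decide, show PySem.Int.toStr 9 = String.ofList ['9'] from by decide, pv_count_single, ← Nat.cast_min]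
  simp only [pv_fold_one]
  have h : (((((((((("" ++ String.ofList (List.replicate (min (List.count '9' X.toList) (List.count '9' Y.toList)) '9')) ++ String.ofList (List.replicate (min (List.count '8' X.toList) (List.count '8' Y.toList)) '8')) ++ String.ofList (List.replicate (min (List.count '7' X.toList) (List.count '7' Y.toList)) '7')) ++ String.ofList (List.replicate (min (List.count '6' X.toList) (List.count '6' Y.toList)) '6')) ++ String.ofList (List.replicate (min (List.count '5' X.toList) (List.count '5' Y.toList)) '5')) ++ String.ofList (List.replicate (min (List.count '4' X.toList) (List.count '4' Y.toList)) '4')) ++ String.ofList (List.replicate (min (List.count '3' X.toList) (List.count '3' Y.toList)) '3')) ++ String.ofList (List.replicate (min (List.count '2' X.toList) (List.count '2' Y.toList)) '2')) ++ String.ofList (List.replicate (min (List.count '1' X.toList) (List.count '1' Y.toList)) '1')) ++ String.ofList (List.replicate (min (List.count '0' X.toList) (List.count '0' Y.toList)) '0')) = String.ofList (pvCanon X Y) := by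
    simp [pvCanon, pvCnt, String.append_assoc]
  rw [h]
  rcases hc : pvCanon X Y with _ | ⟨d, t⟩
  · simp [pvF]
  · have hne : String.ofList (d :: t) ≠ "" := by
      intro he
      have := congrArg String.toList he
      simp at this
    simp [pvF, hne, pysem, PySem.List.pyIdx?]

theorem pv_merge_eq_canon (X Y : String) :
    mergeCommon
      (PySem.List.sorted (X.toList.filter (fun c => decide ('0' ≤ c ∧ c ≤ '9'))) (fun c => c) true)
      (PySem.List.sorted (Y.toList.filter (fun c => decide ('0' ≤ c ∧ c ≤ '9'))) (fun c => c) true)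
      = pvCanon X Y := by
  have hx := PySem.List.sorted_pairwise_rev (X.toList.filter (fun c => decide ('0' ≤ c ∧ c ≤ '9'))) (fun c => c)
  have hy := PySem.List.sorted_pairwise_rev (Y.toList.filter (fun c => decide ('0' ≤ c ∧ c ≤ '9'))) (fun c => c)
  apply List.Perm.eq_of_pairwise (le := fun a b : Char => b ≤ a)
  · exact fun a b _ _ h1 h2 => le_antisymm h2 h1
  · exact pv_merge_pairwise _ _ hx hy
  · exact pv_canon_pairwise X Y
  · rw [List.perm_iff_count]
    intro c
    rw [pv_merge_count _ _ hx hy c, pv_filter_count, pv_filter_count, pv_canon_count]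
    by_cases h : '0' ≤ c ∧ c ≤ '9' <;> simp [h, pvCnt]

theorem pv_B_eq (X Y : String) : solution_alt X Y = pvF (pvCanon X Y) := by
  simp only [solution_alt]
  rw [pv_merge_eq_canon]
  rfl

-- ===== VERDICT (by name: the statement is the Claim_ definition above) =====
theorem solution_spec : Claim_equal_solution := by
  intro X Y _
  unfold Spec_solution
  rw [pv_A_eq, pv_B_eq]
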